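-- pv_equiv track=rewrite | github.com/BradleyConlin/northstrike | scripts/maps/csv_cost_query_cli.py | find_lat_lon_columns
-- ===== SOURCE A (Python) =====
-- def find_lat_lon_columns(header):
--     lat_idx = lon_idx = -1
--     for i, name in enumerate(header):
--         n = (name or "").strip().lower()
--         if n in ("lat", "latitude"):
--             lat_idx = i
--         if n in ("lon", "lng", "long", "longitude"):
--             lon_idx = i
--     if lat_idx == -1 or lon_idx == -1:
--         raise RuntimeError(f"Could not find lat/lon columns in header: {header}")
--     return lat_idx, lon_idx
-- ===== SOURCE B (Python) =====
-- def _last_index(header, names):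
--     # scan from the end, return the first (i.e. last overall) matching index
--     for i in range(len(header) - 1, -1, -1):
--         if (header[i] or "").strip().lower() in names:
--             return i
--     return -1
--
--
-- def find_lat_lon_columns(header):
--     lat_idx = _last_index(header, ("lat", "latitude"))
--     lon_idx = _last_index(header, ("lon", "lng", "long", "longitude"))
--     if lat_idx == -1 or lon_idx == -1:
--         raise RuntimeError(f"Could not find lat/lon columns in header: {header}")
--     return lat_idx, lon_idx
-- ===== Notes on version B (the rewrite author's own statement) =====
-- stated objective: simpler
-- what changed: Replaces A's single fused forward pass with a two-state accumulator by one parameterized helper that scans the header backwards and early-returns the last matching index, called once per alias set.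
import Mathlib
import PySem

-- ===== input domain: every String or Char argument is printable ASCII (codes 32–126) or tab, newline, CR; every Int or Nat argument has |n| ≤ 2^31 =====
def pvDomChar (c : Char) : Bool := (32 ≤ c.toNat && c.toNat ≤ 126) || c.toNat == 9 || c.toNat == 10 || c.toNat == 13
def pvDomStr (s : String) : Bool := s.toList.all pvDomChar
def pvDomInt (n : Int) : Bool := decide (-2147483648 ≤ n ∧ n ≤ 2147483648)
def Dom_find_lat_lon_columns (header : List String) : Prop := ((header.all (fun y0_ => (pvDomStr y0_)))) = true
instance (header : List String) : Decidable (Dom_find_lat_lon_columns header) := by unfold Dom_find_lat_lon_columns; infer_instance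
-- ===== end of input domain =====

-- B is simpler by decomposition: one parameterized backward scan with early return, used twice,
-- instead of A's fused forward pass carrying two accumulators. Return-value equivalence only.

-- (name or "").strip().lower(): for a string argument, `name or ""` equals `name` ("" is falsy and yields "")
def pyNorm (s : String) : String := PySem.Str.lower (PySem.Str.strip s)

def latNames : List String := ["lat", "latitude"]
def lonNames : List String := ["lon", "lng", "long", "longitude"]

-- ===== PORT A =====
def find_lat_lon_columns (header : List String) : Int × Int :=
  (PySem.List.enumerate header).foldl
    (fun (st : Int × Int) p =>
      let n := pyNorm p.2
      let st1 := if n ∈ latNames then (p.1, st.2) else st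
      if n ∈ lonNames then (st1.1, p.1) else st1)
    (-1, -1)
-- the Python then raises RuntimeError when either component is -1; Pre_ excludes exactly those inputs

-- ===== PORT B =====
-- _last_index: scan from the end, return first matching index, else -1 (transcribed as
-- recursion over the reversed enumeration, matching the range(len-1,-1,-1) loop)
def lastIndexGo (names : List String) : List (Int × String) → Int
  | [] => -1
  | (i, s) :: rest => if pyNorm s ∈ names then i else lastIndexGo names rest

def find_lat_lon_columns_alt (header : List String) : Int × Int :=
  let rev := (PySem.List.enumerate header).reverse
  (lastIndexGo latNames rev, lastIndexGo lonNames rev)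
-- the Python then raises the same RuntimeError when either component is -1 (outside Pre_)

-- ===== PRECONDITION & SPEC =====
-- Pre_ excludes exactly the inputs where the Python A raises RuntimeError (no lat or no lon column);
-- B raises identically there.
def Pre_find_lat_lon_columns (header : List String) : Prop :=
  (header.any (fun s => pyNorm s ∈ latNames)) = true ∧
  (header.any (fun s => pyNorm s ∈ lonNames)) = true
instance (header : List String) : Decidable (Pre_find_lat_lon_columns header) := by
  unfold Pre_find_lat_lon_columns; infer_instance

def pvWitness_find_lat_lon_columns : List String := ["id", "Lat", " lon "]

def Spec_find_lat_lon_columns (header : List String) (out : Int × Int) : Prop := out = find_lat_lon_columns_alt header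
instance (header : List String) (out : Int × Int) : Decidable (Spec_find_lat_lon_columns header out) := by unfold Spec_find_lat_lon_columns; infer_instance

-- ===== CLAIM (what is proved, stated in full; the proofs are below) =====
def Claim_equal_find_lat_lon_columns : Prop := ∀ (header : List String), Dom_find_lat_lon_columns header → Pre_find_lat_lon_columns header → Spec_find_lat_lon_columns header (find_lat_lon_columns header)

-- ===== LEMMAS AND PROOFS =====

-- last match of `names` in l, with fallback d when none: what one step of A's fold maintains
def lastOr (names : List String) (l : List (Int × String)) (d : Int) : Int :=
  let r := lastIndexGo names l.reverse
  if r = -1 then d else r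

lemma lastIndexGo_append (names : List String) (xs ys : List (Int × String))
    (hxs : ∀ p ∈ xs, (0:Int) ≤ p.1) :
    lastIndexGo names (xs ++ ys) =
      if lastIndexGo names xs = -1 then lastIndexGo names ys else lastIndexGo names xs := by
  induction xs with
  | nil => simp [lastIndexGo]
  | cons p t ih =>
    obtain ⟨i, s⟩ := p
    have hi : (0:Int) ≤ i := by have := hxs (i, s) (by simp); simpa using this
    have ht := fun q hq => hxs q (List.mem_cons_of_mem _ hq)
    by_cases h : pyNorm s ∈ names <;> simp [lastIndexGo, h, ih ht]
    · intro hc; omega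

lemma lastOr_cons (names : List String) (i : Int) (s : String) (t : List (Int × String)) (d : Int)
    (hi : i ≠ -1) (ht : ∀ p ∈ t, (0:Int) ≤ p.1) :
    lastOr names ((i, s) :: t) d =
      lastOr names t (if pyNorm s ∈ names then i else d) := by
  have hrev : ∀ p ∈ t.reverse, (0:Int) ≤ p.1 := fun p hp => ht p (List.mem_reverse.mp hp)
  simp only [lastOr, List.reverse_cons, lastIndexGo_append names t.reverse _ hrev]
  by_cases h : pyNorm s ∈ names <;> simp [lastIndexGo, h] <;> split_ifs <;> simp_all

lemma enumerate_fst_nonneg (header : List String) (s : Int) (hs : 0 ≤ s) (p : Int × String)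
    (hp : p ∈ PySem.List.enumerate header s) : 0 ≤ p.1 := by
  rw [PySem.List.mem_enumerate_iff] at hp
  obtain ⟨k, hk, rfl⟩ := hp
  simp; omega

lemma foldl_eq_lastOr (l : List (Int × String)) (st : Int × Int)
    (hl : ∀ p ∈ l, (0:Int) ≤ p.1) :
    l.foldl
      (fun (st : Int × Int) p =>
        let n := pyNorm p.2
        let st1 := if n ∈ latNames then (p.1, st.2) else st
        if n ∈ lonNames then (st1.1, p.1) else st1)
      st = (lastOr latNames l st.1, lastOr lonNames l st.2) := by
  induction l generalizing st with
  | nil => simp [lastOr, lastIndexGo]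
  | cons p t ih =>
    obtain ⟨i, s⟩ := p
    have hi : i ≠ -1 := by have := hl (i, s) (by simp); simp at this; omega
    have ht : ∀ q ∈ t, (0:Int) ≤ q.1 := fun q hq => hl q (by simp [hq])
    rw [List.foldl_cons, ih _ ht, lastOr_cons _ _ _ _ _ hi ht, lastOr_cons _ _ _ _ _ hi ht]
    by_cases h1 : pyNorm s ∈ latNames <;> by_cases h2 : pyNorm s ∈ lonNames <;> simp [h1, h2]

lemma lastOr_neg_one (names : List String) (l : List (Int × String)) :
    lastOr names l (-1) = lastIndexGo names l.reverse := by
  simp only [lastOr]; split_ifs with h <;> simp [h]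

-- ===== VERDICT (by name: the statement is the Claim_ definition above) =====
theorem find_lat_lon_columns_spec : Claim_equal_find_lat_lon_columns := by
  intro header _ _
  unfold Spec_find_lat_lon_columns find_lat_lon_columns find_lat_lon_columns_alt
  rw [foldl_eq_lastOr _ _ (enumerate_fst_nonneg header 0 (by norm_num))]
  simp [lastOr_neg_one]
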